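-- pv_equiv track=rewrite | github.com/aisaacroth/Hacker-Rank | Utopian-Tree/Python/tree_height.py | determine_tree_height
-- ===== SOURCE A (Python) =====
-- def determine_tree_height(number):
--     total_height = 1
--
--     for i in range(number):
--         if i % 2 == 0:
--             total_height *= 2
--         else:
--             total_height += 1
--
--     return total_height
-- ===== SOURCE B (Python) =====
-- def determine_tree_height(number):
--     if number <= 0:
--         return 1
--     if number % 2 == 0:
--         return 2 ** (number // 2 + 1) - 1
--     return 2 ** ((number + 1) // 2 + 1) - 2
-- ===== Notes on version B (the rewrite author's own statement) =====
-- stated objective: faster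
-- what changed: Replaces the per-cycle loop with the closed form 2^(n/2+1)-1 (even n) / 2^((n+1)/2+1)-2 (odd n).
import Mathlib
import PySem

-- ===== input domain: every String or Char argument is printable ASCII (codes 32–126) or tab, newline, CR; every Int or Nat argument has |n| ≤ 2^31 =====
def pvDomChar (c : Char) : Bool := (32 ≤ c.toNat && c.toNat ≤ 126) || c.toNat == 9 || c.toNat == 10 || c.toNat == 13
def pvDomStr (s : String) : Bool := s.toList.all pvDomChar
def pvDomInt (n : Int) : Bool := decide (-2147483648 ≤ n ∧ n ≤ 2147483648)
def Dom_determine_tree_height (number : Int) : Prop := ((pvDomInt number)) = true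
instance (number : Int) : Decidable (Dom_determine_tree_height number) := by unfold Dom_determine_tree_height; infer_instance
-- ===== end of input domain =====

-- B replaces A's per-cycle loop by the closed form 2^(n/2+1)-1 / 2^((n+1)/2+1)-2 (asymptotically faster).


-- ===== PORT A =====
def determine_tree_height (number : Int) : Int :=
  (PySem.List.pyRange 0 number 1).foldl
    (fun total_height i => if PySem.Int.mod i 2 = 0 then total_height * 2 else total_height + 1)
    1

-- ===== PORT B =====
def determine_tree_height_alt (number : Int) : Int :=
  if number ≤ 0 then 1
  else if PySem.Int.mod number 2 = 0 then 2 ^ (PySem.Int.floordiv number 2 + 1).toNat - 1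
  else 2 ^ (PySem.Int.floordiv (number + 1) 2 + 1).toNat - 2

-- ===== PRECONDITION & SPEC =====
def Spec_determine_tree_height (number : Int) (out : Int) : Prop := out = determine_tree_height_alt number
instance (number : Int) (out : Int) : Decidable (Spec_determine_tree_height number out) := by unfold Spec_determine_tree_height; infer_instance

-- ===== CLAIM (what is proved, stated in full; the proofs are below) =====
def Claim_equal_determine_tree_height : Prop := ∀ (number : Int), Dom_determine_tree_height number → Spec_determine_tree_height number (determine_tree_height number)

-- ===== LEMMAS AND PROOFS =====

-- A's loop on a nonnegative count, characterised by the closed form.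
lemma loop_closed (n : Nat) :
    determine_tree_height (n : Int)
      = if n % 2 = 0 then 2 ^ (n / 2 + 1) - 1 else (2 ^ ((n + 1) / 2 + 1) - 2 : Int) := by
  induction n with
  | zero => simp [determine_tree_height, PySem.List.pyRange_one_eq_nil]
  | succ n ih =>
    have h : PySem.List.pyRange 0 ((n : Int) + 1) 1
        = PySem.List.pyRange 0 (n : Int) 1 ++ [(n : Int)] :=
      PySem.List.pyRange_one_succ_right (by positivity)
    have hmod : PySem.Int.mod (n : Int) 2 = ((n % 2 : Nat) : Int) := by
      simp only [PySem.Int.mod, Int.fmod_eq_emod]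
      norm_num
    unfold determine_tree_height at ih ⊢
    push_cast
    rw [h, List.foldl_append]
    rw [ih]
    simp only [List.foldl_cons, List.foldl_nil, hmod]
    rcases Nat.even_or_odd n with ⟨m, hm⟩ | ⟨m, hm⟩
    · subst hm
      have h2 : (m + m) % 2 = 0 := by omega
      have h3 : (m + m + 1) % 2 = 1 := by omega
      have h4 : (m + m) / 2 = m := by omega
      have h5 : (m + m + 1 + 1) / 2 = m + 1 := by omega
      simp only [h2, h3, h4, h5]
      norm_num [pow_succ]
      ring
    · subst hm
      have h2 : (2 * m + 1) % 2 = 1 := by omega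
      have h3 : (2 * m + 1 + 1) % 2 = 0 := by omega
      have h4 : (2 * m + 1 + 1) / 2 = m + 1 := by omega
      simp only [h2, h3, h4]
      norm_num
      ring

-- ===== VERDICT (by name: the statement is the Claim_ definition above) =====
theorem determine_tree_height_spec : Claim_equal_determine_tree_height := by
  intro number _
  unfold Spec_determine_tree_height determine_tree_height_alt
  by_cases hle : number ≤ 0
  · simp only [hle, if_true]
    unfold determine_tree_height
    rw [PySem.List.pyRange_one_eq_nil hle]
    rfl
  · rw [not_le] at hle
    obtain ⟨n, rfl⟩ : ∃ m : Nat, number = (m : Int) := ⟨number.toNat, (Int.toNat_of_nonneg hle.le).symm⟩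
    have hn : 0 < n := by exact_mod_cast hle
    rw [loop_closed]
    simp only [show ¬ ((n : Int) ≤ 0) by exact_mod_cast Nat.not_le.mpr hn, if_false]
    have hmod : PySem.Int.mod (n : Int) 2 = ((n % 2 : Nat) : Int) := by
      simp only [PySem.Int.mod, Int.fmod_eq_emod]
      norm_num
    have hdiv : PySem.Int.floordiv (n : Int) 2 = ((n / 2 : Nat) : Int) := by
      have := Int.fdiv_eq_ediv_of_nonneg (n : Int) (by norm_num : (0:Int) ≤ 2)
      simp only [PySem.Int.floordiv, this]; omega
    have hdiv' : PySem.Int.floordiv ((n : Int) + 1) 2 = (((n + 1) / 2 : Nat) : Int) := by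
      have : ((n : Int) + 1) = ((n + 1 : Nat) : Int) := by push_cast; ring
      have h2 := Int.fdiv_eq_ediv_of_nonneg ((n : Int)+1) (by norm_num : (0:Int) ≤ 2)
      simp only [PySem.Int.floordiv, h2]; omega
    rw [hmod, hdiv, hdiv']
    rcases Nat.even_or_odd n with he | ho
    · have h2 : n % 2 = 0 := Nat.even_iff.mp he
      simp only [h2, Nat.cast_zero, if_true]
      congr 1
    · have h2 : n % 2 = 1 := Nat.odd_iff.mp ho
      simp only [h2]
      norm_num
      congr 1
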